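-- pv_equiv track=rewrite | github.com/ChangWinde/pixshift | pixshift/dedup_engine.py | _cluster_by_hash
-- ===== SOURCE A (Python) =====
-- from typing import Optional, List, Dict, Tuple, Set
--
-- def _hamming_distance(hash1: int, hash2: int) -> int:
--     """计算两个哈希值的汉明距离"""
--     xor = hash1 ^ hash2
--     distance = 0
--     while xor:
--         distance += xor & 1
--         xor >>= 1
--     return distance
--
-- def _cluster_by_hash(
--     file_hashes: List[Tuple[str, int, int]],
--     threshold: int,
-- ) -> List[List[Tuple[str, int, int]]]:
--     """将相似哈希的文件聚类"""
--     if not file_hashes: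
--         return []
--
--     used = set()
--     groups = []
--
--     for i, (path_i, hash_i, size_i) in enumerate(file_hashes):
--         if i in used:
--             continue
--
--         group = [(path_i, hash_i, size_i)]
--         used.add(i)
--
--         for j, (path_j, hash_j, size_j) in enumerate(file_hashes):
--             if j in used:
--                 continue
--             if _hamming_distance(hash_i, hash_j) <= threshold:
--                 group.append((path_j, hash_j, size_j))
--                 used.add(j)
--
--         groups.append(group)
--
--     return groups
-- ===== SOURCE B (Python) =====
-- def _cluster_by_hash(file_hashes, threshold):
--     """Online leader clustering: one pass over the items; each item joins the
--     first existing group whose representative (its first member) is within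
--     Hamming threshold (popcount of xor), otherwise it opens a new group."""
--     groups = []
--     for item in file_hashes:
--         for g in groups:
--             if (g[0][1] ^ item[1]).bit_count() <= threshold:
--                 g.append(item)
--                 break
--         else:
--             groups.append([item])
--     return groups
-- ===== Notes on version B (the rewrite author's own statement) =====
-- stated objective: alternative
-- what changed: Replaces A's offline double index loop with a 'used' set (seed scans the whole list, claiming indices) by online leader clustering: a single pass over the items in which each item is compared against the representatives of the groups built so far and joins the first one within threshold or opens a new group; the hand-written shift/mask Hamming loop becomes int.bit_count() of the xor.
import Mathlib
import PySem

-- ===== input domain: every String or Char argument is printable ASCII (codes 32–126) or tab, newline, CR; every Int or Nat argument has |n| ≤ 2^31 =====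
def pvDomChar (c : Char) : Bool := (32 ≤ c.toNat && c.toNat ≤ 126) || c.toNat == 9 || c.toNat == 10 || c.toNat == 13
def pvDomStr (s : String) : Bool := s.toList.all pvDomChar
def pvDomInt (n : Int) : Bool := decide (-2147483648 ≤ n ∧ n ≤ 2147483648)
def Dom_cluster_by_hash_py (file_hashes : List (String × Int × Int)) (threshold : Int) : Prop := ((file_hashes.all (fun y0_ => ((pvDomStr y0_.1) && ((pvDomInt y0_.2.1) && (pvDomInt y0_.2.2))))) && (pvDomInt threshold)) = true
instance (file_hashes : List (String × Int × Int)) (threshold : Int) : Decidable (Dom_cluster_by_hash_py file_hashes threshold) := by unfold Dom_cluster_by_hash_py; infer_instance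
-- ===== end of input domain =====

-- B replaces A's offline double index loop with a 'used' set by online leader
-- clustering: one pass over the items, each item joins the first existing
-- group whose representative (first member) is within threshold, else it
-- opens a new group; popcount of the xor replaces the shift/mask loop.


-- ===== PORT A =====
-- _hamming_distance: 'while xor: distance += xor & 1; xor >>= 1'.
-- For negative xor the Python loop never terminates; the port's 0 < x guard
-- is the totality guard (exact wherever the Python returns, i.e. xor ≥ 0).
def hamGo (x d : Int) : Int :=
  if h : 0 < x then hamGo (x >>> (1 : Nat)) (d + PySem.Int.band x 1) else d
termination_by x.toNat
decreasing_by
  have h1 : x >>> (1 : Nat) = x / 2 := by rw [Int.shiftRight_eq_div_pow]; norm_num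
  rw [h1]; omega

def hamming_distance_py (h1 h2 : Int) : Int :=
  hamGo (PySem.Int.bxor h1 h2) 0

def cluster_by_hash_py (file_hashes : List (String × Int × Int)) (threshold : Int) : List (List (String × Int × Int)) :=
  if file_hashes = [] then []
  else
    let res := (PySem.List.enumerate file_hashes 0).foldl
      (fun (st : PySem.Set Int × List (List (String × Int × Int))) ip =>
        if PySem.Set.contains st.1 ip.1 then st
        else
          let used1 := PySem.Set.add st.1 ip.1
          let inner := (PySem.List.enumerate file_hashes 0).foldl
            (fun (st2 : PySem.Set Int × List (String × Int × Int)) jp =>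
              if PySem.Set.contains st2.1 jp.1 then st2
              else if hamming_distance_py ip.2.2.1 jp.2.2.1 ≤ threshold then
                (PySem.Set.add st2.1 jp.1, st2.2 ++ [jp.2])
              else st2)
            (used1, [ip.2])
          (inner.1, st.2 ++ [inner.2]))
      (PySem.Set.empty, [])
    res.2

-- ===== PORT B =====
-- (g[0][1] ^ item[1]).bit_count() : PySem.Int.bitCount reads |n|, Python-exact.
def altHam (h1 h2 : Int) : Int :=
  (PySem.Int.bitCount (PySem.Int.bxor h1 h2) : Int)

-- the inner 'for g in groups: … break / else: append' of Source B; g[0] is the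
-- group's representative (groups are nonempty by construction, so headI is exact)
def altIns (t : Int) (it : String × Int × Int) : List (List (String × Int × Int)) → List (List (String × Int × Int))
  | [] => [[it]]
  | g :: gs =>
    if altHam g.headI.2.1 it.2.1 ≤ t then (g ++ [it]) :: gs
    else g :: altIns t it gs

def cluster_by_hash_py_alt (file_hashes : List (String × Int × Int)) (threshold : Int) : List (List (String × Int × Int)) :=
  file_hashes.foldl (fun gs it => altIns threshold it gs) []

-- ===== PRECONDITION & SPEC =====
-- Pre_ excludes lists whose hashes mix signs: there A's _hamming_distance is
-- called on a negative xor and its 'while xor' loop never terminates (A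
-- diverges, returning nothing). On same-sign hashes the xor is nonnegative
-- and A returns.
def Pre_cluster_by_hash_py (file_hashes : List (String × Int × Int)) (threshold : Int) : Prop :=
  (∀ p ∈ file_hashes, 0 ≤ p.2.1) ∨ (∀ p ∈ file_hashes, p.2.1 < 0)
instance (file_hashes : List (String × Int × Int)) (threshold : Int) : Decidable (Pre_cluster_by_hash_py file_hashes threshold) := by unfold Pre_cluster_by_hash_py; infer_instance

def pvWitness_cluster_by_hash_py : (List (String × Int × Int)) × Int :=
  ([("a", 3, 10), ("b", 2, 20), ("c", 60, 5)], 1)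

def Spec_cluster_by_hash_py (file_hashes : List (String × Int × Int)) (threshold : Int) (out : List (List (String × Int × Int))) : Prop := out = cluster_by_hash_py_alt file_hashes threshold
instance (file_hashes : List (String × Int × Int)) (threshold : Int) (out : List (List (String × Int × Int))) : Decidable (Spec_cluster_by_hash_py file_hashes threshold out) := by unfold Spec_cluster_by_hash_py; infer_instance

-- ===== CLAIM (what is proved, stated in full; the proofs are below) =====
def Claim_equal_cluster_by_hash_py : Prop := ∀ (file_hashes : List (String × Int × Int)) (threshold : Int), Dom_cluster_by_hash_py file_hashes threshold → Pre_cluster_by_hash_py file_hashes threshold → Spec_cluster_by_hash_py file_hashes threshold (cluster_by_hash_py file_hashes threshold)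

-- ===== LEMMAS AND PROOFS =====

-- proof-only intermediate: the greedy clustering phrased as a shrinking
-- work-list partitioned around its first element (bridges A's fold and B's fold)
def altGo (threshold : Int) : List (String × Int × Int) → List (List (String × Int × Int))
  | [] => []
  | seed :: rest =>
    ([seed] ++ rest.filter (fun it => decide (altHam seed.2.1 it.2.1 ≤ threshold))) ::
      altGo threshold (rest.filter (fun it => decide (¬ altHam seed.2.1 it.2.1 ≤ threshold)))
termination_by l => l.length
decreasing_by
  simp only [List.length_unattach, List.length_cons]
  exact Nat.lt_succ_of_le (le_trans (List.length_filter_le _ _) (le_of_eq List.length_attach))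

-- popcount agreement: A's shift/mask loop equals bit_count, for nonnegative xor
theorem hamGo_natCast (m : Nat) : ∀ (d : Int), hamGo (m : Int) d = d + (PySem.Int.bitCount (m : Int) : Int) := by
  induction m using Nat.strong_induction_on with
  | _ m IH =>
    intro d
    rw [hamGo]
    by_cases hm : 0 < m
    · have hpos : (0 : Int) < (m : Int) := by exact_mod_cast hm
      rw [dif_pos hpos]
      have e1 : ((m : Int)) >>> (1 : Nat) = ((m / 2 : Nat) : Int) := by
        rw [Int.shiftRight_eq_div_pow, pow_one]
        omega
      have e2 : PySem.Int.band (m : Int) 1 = ((m % 2 : Nat) : Int) := by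
        have h := PySem.Int.band_natCast m 1
        norm_num at h
        rw [h]
        omega
      rw [e1, e2, IH (m / 2) (by omega)]
      have e3 := PySem.Int.bitCount_natCast hm
      rw [e3]
      push_cast
      ring
    · have : ¬ (0 : Int) < (m : Int) := by exact_mod_cast hm
      rw [dif_neg this]
      have hm0 : m = 0 := by omega
      subst hm0
      simp [PySem.Int.bitCount_zero]

theorem ham_eq (h1 h2 : Int) (hx : 0 ≤ PySem.Int.bxor h1 h2) :
    hamming_distance_py h1 h2 = altHam h1 h2 := by
  unfold hamming_distance_py altHam
  obtain ⟨m, hm⟩ : ∃ m : Nat, PySem.Int.bxor h1 h2 = (m : Int) :=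
    ⟨(PySem.Int.bxor h1 h2).toNat, (Int.toNat_of_nonneg hx).symm⟩
  rw [hm, hamGo_natCast]
  simp

theorem bxor_nonneg_of_sign (a b : Int) (h : 0 ≤ a ↔ 0 ≤ b) : 0 ≤ PySem.Int.bxor a b := by
  unfold PySem.Int.bxor
  by_cases h1 : 0 ≤ a <;> by_cases h2 : 0 ≤ b <;> simp [h1, h2] <;> tauto

-- the inner j-loop: appends exactly the not-yet-used items within threshold
theorem inner_fold_spec (hi t : Int) (M : List (Int × (String × Int × Int))) :
    ∀ (U : List Int) (g : List (String × Int × Int)),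
    (M.map Prod.fst).Nodup →
    (M.foldl (fun (st2 : PySem.Set Int × List (String × Int × Int)) jp =>
        if PySem.Set.contains st2.1 jp.1 then st2
        else if hamming_distance_py hi jp.2.2.1 ≤ t then
          (PySem.Set.add st2.1 jp.1, st2.2 ++ [jp.2])
        else st2)
      (U, g))
    = (U ++ (M.filter (fun jp => !(PySem.Set.contains U jp.1) && decide (hamming_distance_py hi jp.2.2.1 ≤ t))).map Prod.fst,
       g ++ (M.filter (fun jp => !(PySem.Set.contains U jp.1) && decide (hamming_distance_py hi jp.2.2.1 ≤ t))).map Prod.snd) := by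
  induction M with
  | nil => intro U g _; simp
  | cons jp M' IH =>
    intro U g hnd
    have hnd' : (M'.map Prod.fst).Nodup := by
      simp only [List.map_cons, List.nodup_cons] at hnd
      exact hnd.2
    have hfst : jp.1 ∉ M'.map Prod.fst := by
      simp only [List.map_cons, List.nodup_cons] at hnd
      exact hnd.1
    simp only [List.foldl_cons]
    by_cases hc : PySem.Set.contains U jp.1
    · simp only [hc, if_true, List.filter_cons, hc, Bool.not_true, Bool.false_and,
        Bool.false_eq_true, if_false]
      exact IH U g hnd'
    · by_cases hh : hamming_distance_py hi jp.2.2.1 ≤ t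
      · have hmemU : jp.1 ∉ U := by simpa using hc
        have hadd : PySem.Set.add U jp.1 = U ++ [jp.1] := by
          simp [PySem.Set.add, hc, hmemU]
        rw [if_neg hc, if_pos hh, hadd, IH (U ++ [jp.1]) (g ++ [jp.2]) hnd']
        have hcong : M'.filter (fun q => !(PySem.Set.contains (U ++ [jp.1]) q.1) && decide (hamming_distance_py hi q.2.2.1 ≤ t))
            = M'.filter (fun q => !(PySem.Set.contains U q.1) && decide (hamming_distance_py hi q.2.2.1 ≤ t)) := by
          apply List.filter_congr
          intro q hq
          have hne : q.1 ≠ jp.1 := by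
            intro he
            exact hfst (he ▸ List.mem_map_of_mem hq)
          simp [PySem.Set.contains, List.contains_append, hne]
        rw [hcong]
        simp [List.filter_cons, hmemU, hh]
      · simp only [hc, if_false, hh, if_false, List.filter_cons, Bool.not_false,
          Bool.true_and, decide_eq_false hh, if_false]
        exact IH U g hnd'

theorem enum_fst_nodup (fh : List (String × Int × Int)) :
    ((PySem.List.enumerate fh 0).map Prod.fst).Nodup := by
  have hp : (PySem.List.enumerate fh 0).Pairwise (fun p q => p.1 < q.1) :=
    PySem.List.pairwise_lt_enumerate fh 0
  have := hp.map (f := Prod.fst) (fun a b h => h)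
  exact this.imp (fun h => ne_of_lt h)

-- the outer i-loop with seed-invariant: appends exactly the work-list groups of the remaining items
theorem outer_fold_spec (fh : List (String × Int × Int)) (t : Int)
    (hham : ∀ a ∈ fh, ∀ b ∈ fh, hamming_distance_py a.2.1 b.2.1 = altHam a.2.1 b.2.1) :
    ∀ (E : List (Int × (String × Int × Int))) (U : List Int) (G : List (List (String × Int × Int))),
    E <:+ PySem.List.enumerate fh 0 →
    (∀ p ∈ PySem.List.enumerate fh 0, p.1 ∉ U → p ∈ E) →
    (E.foldl (fun (st : PySem.Set Int × List (List (String × Int × Int))) ip =>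
        if PySem.Set.contains st.1 ip.1 then st
        else
          (((PySem.List.enumerate fh 0).foldl
            (fun (st2 : PySem.Set Int × List (String × Int × Int)) jp =>
              if PySem.Set.contains st2.1 jp.1 then st2
              else if hamming_distance_py ip.2.2.1 jp.2.2.1 ≤ t then
                (PySem.Set.add st2.1 jp.1, st2.2 ++ [jp.2])
              else st2)
            (PySem.Set.add st.1 ip.1, [ip.2])).1,
           st.2 ++ [((PySem.List.enumerate fh 0).foldl
            (fun (st2 : PySem.Set Int × List (String × Int × Int)) jp =>
              if PySem.Set.contains st2.1 jp.1 then st2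
              else if hamming_distance_py ip.2.2.1 jp.2.2.1 ≤ t then
                (PySem.Set.add st2.1 jp.1, st2.2 ++ [jp.2])
              else st2)
            (PySem.Set.add st.1 ip.1, [ip.2])).2]))
      (U, G)).2
    = G ++ altGo t ((E.filter (fun p => !(PySem.Set.contains U p.1))).map Prod.snd) := by
  intro E
  induction E with
  | nil => intro U G _ _; simp [altGo]
  | cons e E' IH =>
    intro U G hsuf hcov
    have hLnd : ((PySem.List.enumerate fh 0).map Prod.fst).Nodup := enum_fst_nodup fh
    have hsubl : (e :: E').Sublist (PySem.List.enumerate fh 0) := hsuf.sublist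
    have hEnd : ((e :: E').map Prod.fst).Nodup := (hsubl.map Prod.fst).nodup hLnd
    have hE'nd : (E'.map Prod.fst).Nodup := by
      simp only [List.map_cons, List.nodup_cons] at hEnd; exact hEnd.2
    have hfstE' : e.1 ∉ E'.map Prod.fst := by
      simp only [List.map_cons, List.nodup_cons] at hEnd; exact hEnd.1
    have hsuf' : E' <:+ PySem.List.enumerate fh 0 := (List.suffix_cons e E').trans hsuf
    have heL : e ∈ PySem.List.enumerate fh 0 := hsuf.mem (List.mem_cons_self)
    have hmemfh : ∀ p ∈ PySem.List.enumerate fh 0, p.2 ∈ fh := by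
      intro p hp
      have : p.2 ∈ (PySem.List.enumerate fh 0).map Prod.snd := List.mem_map_of_mem hp
      rwa [PySem.List.map_snd_enumerate] at this
    simp only [List.foldl_cons]
    by_cases hc : PySem.Set.contains U e.1
    · have hceU : e.1 ∈ U := by simpa using hc
      rw [if_pos hc]
      have hcov' : ∀ p ∈ PySem.List.enumerate fh 0, p.1 ∉ U → p ∈ E' := by
        intro p hp hpu
        rcases List.mem_cons.mp (hcov p hp hpu) with rfl | h
        · exact absurd hceU hpu
        · exact h
      rw [IH U G hsuf' hcov']
      simp [List.filter_cons, hceU]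
    · have hcU : e.1 ∉ U := by simpa using hc
      rw [if_neg hc]
      have hadd : PySem.Set.add U e.1 = U ++ [e.1] := by simp [PySem.Set.add, hc, hcU]
      obtain ⟨pre, hpre⟩ := hsuf
      have hpreU : ∀ p ∈ pre, p.1 ∈ U := by
        intro p hp
        by_contra hpu
        have hpL : p ∈ PySem.List.enumerate fh 0 := by
          rw [← hpre]; exact List.mem_append_left _ hp
        have hpe : p ∈ e :: E' := hcov p hpL hpu
        have hdisj : List.Disjoint (pre.map Prod.fst) ((e :: E').map Prod.fst) := by
          have := hLnd
          rw [← hpre, List.map_append] at this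
          exact List.disjoint_of_nodup_append this
        exact hdisj (List.mem_map_of_mem hp) (List.mem_map_of_mem hpe)
      rw [inner_fold_spec e.2.2.1 t (PySem.List.enumerate fh 0) (PySem.Set.add U e.1) [e.2] hLnd]
      have hmatched :
          (PySem.List.enumerate fh 0).filter
              (fun jp => !(PySem.Set.contains (PySem.Set.add U e.1) jp.1) && decide (hamming_distance_py e.2.2.1 jp.2.2.1 ≤ t))
            = E'.filter (fun jp => !(PySem.Set.contains U jp.1) && decide (hamming_distance_py e.2.2.1 jp.2.2.1 ≤ t)) := by
        rw [← hpre, List.filter_append]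
        have h1 : pre.filter (fun jp => !(PySem.Set.contains (PySem.Set.add U e.1) jp.1) && decide (hamming_distance_py e.2.2.1 jp.2.2.1 ≤ t)) = [] := by
          rw [List.filter_eq_nil_iff]
          intro p hp
          have := hpreU p hp
          simp [hadd, this]
        have h2 : (e :: E').filter (fun jp => !(PySem.Set.contains (PySem.Set.add U e.1) jp.1) && decide (hamming_distance_py e.2.2.1 jp.2.2.1 ≤ t))
            = E'.filter (fun jp => !(PySem.Set.contains U jp.1) && decide (hamming_distance_py e.2.2.1 jp.2.2.1 ≤ t)) := by
          rw [List.filter_cons]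
          have he : (!(PySem.Set.contains (PySem.Set.add U e.1) e.1) && decide (hamming_distance_py e.2.2.1 e.2.2.1 ≤ t)) = false := by
            simp [hadd]
          rw [he]
          simp only [Bool.false_eq_true, if_false]
          apply List.filter_congr
          intro q hq
          have hne : q.1 ≠ e.1 := by
            intro hh
            exact hfstE' (hh ▸ List.mem_map_of_mem hq)
          simp [hadd, PySem.Set.contains, hne]
        rw [h1, h2, List.nil_append]
      rw [hmatched, hadd]
      set PbU : (Int × (String × Int × Int)) → Bool :=
        (fun jp => !(PySem.Set.contains U jp.1) && decide (hamming_distance_py e.2.2.1 jp.2.2.1 ≤ t)) with hPbU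
      have hcov2 : ∀ p ∈ PySem.List.enumerate fh 0,
          p.1 ∉ (U ++ [e.1]) ++ (E'.filter PbU).map Prod.fst → p ∈ E' := by
        intro p hp hpu
        have hpu' : p.1 ∉ U := fun h => hpu (by simp [h])
        rcases List.mem_cons.mp (hcov p hp hpu') with rfl | h
        · exact absurd (by simp) hpu
        · exact h
      rw [IH ((U ++ [e.1]) ++ (E'.filter PbU).map Prod.fst) (G ++ [[e.2] ++ (E'.filter PbU).map Prod.snd]) hsuf' hcov2]
      have hhq : ∀ q ∈ E', altHam e.2.2.1 q.2.2.1 = hamming_distance_py e.2.2.1 q.2.2.1 := by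
        intro q hq
        exact (hham e.2 (hmemfh e heL) q.2 (hmemfh q (hsuf'.sublist.subset hq))).symm
      have hrhs : (List.filter (fun p => !(PySem.Set.contains U p.1)) (e :: E')).map Prod.snd
          = e.2 :: (E'.filter (fun p => !(PySem.Set.contains U p.1))).map Prod.snd := by
        simp [List.filter_cons, hcU]
      rw [hrhs]
      conv_rhs => rw [altGo]
      have hgroup : ((E'.filter (fun p => !(PySem.Set.contains U p.1))).map Prod.snd).filter
            (fun it => decide (altHam e.2.2.1 it.2.1 ≤ t))
          = (E'.filter PbU).map Prod.snd := by
        rw [List.filter_map, List.filter_filter]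
        congr 1
        apply List.filter_congr
        intro q hq
        simp [hPbU, Function.comp, hhq q hq, Bool.and_comm]
      have hrem : ((E'.filter (fun p => !(PySem.Set.contains U p.1))).map Prod.snd).filter
            (fun it => decide (¬ altHam e.2.2.1 it.2.1 ≤ t))
          = (E'.filter (fun p => !(PySem.Set.contains ((U ++ [e.1]) ++ (E'.filter PbU).map Prod.fst) p.1))).map Prod.snd := by
        rw [List.filter_map, List.filter_filter]
        congr 1
        apply List.filter_congr
        intro q hq
        have hne : q.1 ≠ e.1 := fun hh => hfstE' (hh ▸ List.mem_map_of_mem hq)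
        have hmf : q.1 ∈ (E'.filter PbU).map Prod.fst ↔ PbU q = true := by
          constructor
          · intro hm
            obtain ⟨r, hr, hre⟩ := List.mem_map.mp hm
            have hrE : r ∈ E' := List.mem_of_mem_filter hr
            have : r = q := List.inj_on_of_nodup_map hE'nd hrE hq hre
            exact this ▸ List.of_mem_filter hr
          · intro hm
            exact List.mem_map_of_mem (List.mem_filter.mpr ⟨hq, hm⟩)
        by_cases hqu : q.1 ∈ U
        · simp [hPbU, hqu]
        · by_cases hqh : hamming_distance_py e.2.2.1 q.2.2.1 ≤ t
          · have : q.1 ∈ (E'.filter PbU).map Prod.fst := hmf.mpr (by simp [hPbU, hqu, hqh])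
            simp [hqu, hne, this, hhq q hq, hqh]
          · have : q.1 ∉ (E'.filter PbU).map Prod.fst := fun hm => by
              have := hmf.mp hm
              simp [hPbU, hqu, hqh] at this
            simp [hqu, hne, this, hhq q hq, hqh]
            omega
      rw [hgroup, hrem]
      simp

-- B's fold with an open group in front: items within threshold of its
-- representative s join it, the rest fold into the tail groups H
theorem foldl_ins_open (t : Int) : ∀ (rest : List (String × Int × Int)) (s : String × Int × Int)
    (gt : List (String × Int × Int)) (H : List (List (String × Int × Int))),
    rest.foldl (fun gs it => altIns t it gs) ((s :: gt) :: H)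
    = ((s :: gt) ++ rest.filter (fun it => decide (altHam s.2.1 it.2.1 ≤ t))) ::
      (rest.filter (fun it => decide (¬ altHam s.2.1 it.2.1 ≤ t))).foldl (fun gs it => altIns t it gs) H := by
  intro rest
  induction rest with
  | nil => intro s gt H; simp
  | cons it rest' IH =>
    intro s gt H
    simp only [List.foldl_cons, altIns, List.headI, List.filter_cons]
    by_cases hh : altHam s.2.1 it.2.1 ≤ t
    · rw [if_pos hh]
      have h2 : decide (altHam s.2.1 it.2.1 ≤ t) = true := by simpa using hh
      have h3 : decide (¬ altHam s.2.1 it.2.1 ≤ t) = false := by simpa using hh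
      rw [h2, h3]
      simpa using IH s (gt ++ [it]) H
    · rw [if_neg hh]
      have h2 : decide (altHam s.2.1 it.2.1 ≤ t) = false := by simpa using hh
      have h3 : decide (¬ altHam s.2.1 it.2.1 ≤ t) = true := by simpa using hh
      rw [h2, h3]
      simp only [Bool.false_eq_true, if_false, if_pos rfl]
      exact IH s gt (altIns t it H)

-- B's one-pass fold computes the shrinking-work-list clustering
theorem foldl_ins_eq_altGo_aux (t : Int) : ∀ (n : Nat) (l : List (String × Int × Int)), l.length ≤ n →
    l.foldl (fun gs it => altIns t it gs) [] = altGo t l := by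
  intro n
  induction n with
  | zero =>
    intro l hl
    have : l = [] := List.eq_nil_of_length_eq_zero (Nat.le_zero.mp hl)
    subst this
    simp [altGo]
  | succ n IH =>
    intro l hl
    cases l with
    | nil => simp [altGo]
    | cons s rest =>
      simp only [List.foldl_cons, altIns]
      rw [foldl_ins_open t rest s [] []]
      have hlen : (rest.filter (fun it => decide (¬ altHam s.2.1 it.2.1 ≤ t))).length ≤ n := by
        have := List.length_filter_le (fun it => decide (¬ altHam s.2.1 it.2.1 ≤ t)) rest
        simp only [List.length_cons] at hl
        omega
      rw [IH _ hlen]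
      conv_rhs => rw [altGo]

theorem foldl_ins_eq_altGo (t : Int) (l : List (String × Int × Int)) :
    l.foldl (fun gs it => altIns t it gs) [] = altGo t l :=
  foldl_ins_eq_altGo_aux t l.length l le_rfl

theorem main_equiv (file_hashes : List (String × Int × Int)) (threshold : Int)
    (hpre : Pre_cluster_by_hash_py file_hashes threshold) :
    cluster_by_hash_py file_hashes threshold = cluster_by_hash_py_alt file_hashes threshold := by
  have hham : ∀ a ∈ file_hashes, ∀ b ∈ file_hashes,
      hamming_distance_py a.2.1 b.2.1 = altHam a.2.1 b.2.1 := by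
    intro a ha b hb
    apply ham_eq
    apply bxor_nonneg_of_sign
    rcases hpre with h | h
    · simp [h a ha, h b hb]
    · have h1 := h a ha
      have h2 := h b hb
      constructor <;> intro <;> omega
  unfold cluster_by_hash_py cluster_by_hash_py_alt
  rw [foldl_ins_eq_altGo]
  by_cases hnil : file_hashes = []
  · subst hnil
    simp [altGo]
  · rw [if_neg hnil]
    show (List.foldl (fun (st : PySem.Set Int × List (List (String × Int × Int))) ip =>
        if PySem.Set.contains st.1 ip.1 then st
        else
          (((PySem.List.enumerate file_hashes 0).foldl
            (fun (st2 : PySem.Set Int × List (String × Int × Int)) jp =>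
              if PySem.Set.contains st2.1 jp.1 then st2
              else if hamming_distance_py ip.2.2.1 jp.2.2.1 ≤ threshold then
                (PySem.Set.add st2.1 jp.1, st2.2 ++ [jp.2])
              else st2)
            (PySem.Set.add st.1 ip.1, [ip.2])).1,
           st.2 ++ [((PySem.List.enumerate file_hashes 0).foldl
            (fun (st2 : PySem.Set Int × List (String × Int × Int)) jp =>
              if PySem.Set.contains st2.1 jp.1 then st2
              else if hamming_distance_py ip.2.2.1 jp.2.2.1 ≤ threshold then
                (PySem.Set.add st2.1 jp.1, st2.2 ++ [jp.2])
              else st2)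
            (PySem.Set.add st.1 ip.1, [ip.2])).2]))
        (([] : List Int), ([] : List (List (String × Int × Int))))
        (PySem.List.enumerate file_hashes 0)).2
      = altGo threshold file_hashes
    rw [outer_fold_spec file_hashes threshold hham (PySem.List.enumerate file_hashes 0)
        [] [] List.suffix_rfl (fun p hp _ => hp)]
    have hall : (PySem.List.enumerate file_hashes 0).filter
        (fun p => !(PySem.Set.contains ([] : List Int) p.1)) = PySem.List.enumerate file_hashes 0 := by
      apply List.filter_eq_self.mpr
      intro p _
      simp [PySem.Set.contains]
    rw [hall, PySem.List.map_snd_enumerate, List.nil_append]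

-- ===== VERDICT (by name: the statement is the Claim_ definition above) =====
theorem cluster_by_hash_py_spec : Claim_equal_cluster_by_hash_py := by
  intro fh t _ hpre
  unfold Spec_cluster_by_hash_py
  exact main_equiv fh t hpre
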